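-- pv_equiv track=rewrite | github.com/cppalliance/boost-data-collector | wg21_paper_tracker/cloud_run_job/main.py | is_content_valid
-- ===== SOURCE A (Python) =====
-- from typing import Optional
--
-- MIN_CONTENT_LENGTH = 50
--
-- def is_content_valid(content: Optional[str]) -> bool:
--     if not content:
--         return False
--     content_stripped = content.strip()
--     if len(content_stripped) < MIN_CONTENT_LENGTH:
--         return False
--     error_patterns = [
--         "traceback",
--         "exception:",
--         "error:",
--         "failed to",
--         "unable to convert",
--         "conversion failed",
--         "error processing",
--     ]
--     content_lower = content_stripped.lower()
--     first_part = content_lower[:1000]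
--     for pattern in error_patterns:
--         if pattern in first_part:
--             if pattern in ("error:", "exception:"):
--                 return False
--             idx = first_part.find(pattern)
--             if idx < 100:
--                 return False
--     return True
-- ===== SOURCE B (Python) =====
-- from typing import Optional
--
-- MIN_CONTENT_LENGTH = 50
--
-- ANYWHERE_PATTERNS = ("error:", "exception:")
-- NEAR_START_PATTERNS = (
--     "traceback",
--     "failed to",
--     "unable to convert",
--     "conversion failed",
--     "error processing",
-- )
--
-- def is_content_valid(content: Optional[str]) -> bool:
--     if not content:
--         return False
--     stripped = content.strip()
--     if len(stripped) < MIN_CONTENT_LENGTH: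
--         return False
--     text = stripped.lower()[:1000]
--     # single text-driven scan: walk each position once and test which
--     # patterns start there, instead of one substring search per pattern
--     for i in range(len(text)):
--         for p in ANYWHERE_PATTERNS:
--             if text.startswith(p, i):
--                 return False
--         if i < 100:
--             for p in NEAR_START_PATTERNS:
--                 if text.startswith(p, i):
--                     return False
--     return True
-- ===== Notes on version B (the rewrite author's own statement) =====
-- stated objective: alternative
-- what changed: Replaces A's pattern-driven loop (one substring search per pattern via 'in' and str.find) by a single text-driven scan that walks each position of the first 1000 lowercased characters once, rejecting if an anywhere-pattern starts at any position or a near-start pattern starts at a position below 100.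
import Mathlib
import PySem

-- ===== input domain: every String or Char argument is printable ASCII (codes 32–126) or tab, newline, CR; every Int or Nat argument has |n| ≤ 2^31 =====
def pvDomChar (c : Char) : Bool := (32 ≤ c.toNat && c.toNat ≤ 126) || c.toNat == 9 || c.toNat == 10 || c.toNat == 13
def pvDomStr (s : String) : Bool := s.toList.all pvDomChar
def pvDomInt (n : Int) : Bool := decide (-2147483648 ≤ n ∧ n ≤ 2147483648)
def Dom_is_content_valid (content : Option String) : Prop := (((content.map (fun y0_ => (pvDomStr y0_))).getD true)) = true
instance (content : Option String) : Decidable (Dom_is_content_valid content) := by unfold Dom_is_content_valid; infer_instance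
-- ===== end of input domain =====

-- B replaces A's pattern-driven loop of substring searches by a single text-driven scan that walks each position of the first 1000 lowercased chars once and tests which patterns start there (simpler single pass); return value only, no side effects.

-- ===== PORT A =====
-- the loop 'for pattern in error_patterns: …' of A
def pvLoopA : List String → List Char → Bool
  | [], _ => true
  | p :: ps, fp =>
    if PySem.Chars.isIn p.toList fp then
      if p == "error:" || p == "exception:" then false
      else
        let idx := PySem.Chars.find fp p.toList
        if idx < 100 then false else pvLoopA ps fp
    else pvLoopA ps fp

def is_content_valid (content : Option String) : Bool :=
  match content with
  | none => false
  | some c =>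
    if c.toList = [] then false
    else
      let content_stripped := PySem.Chars.strip c.toList
      if content_stripped.length < 50 then false
      else
        let error_patterns := ["traceback", "exception:", "error:", "failed to",
          "unable to convert", "conversion failed", "error processing"]
        let content_lower := PySem.Chars.lower content_stripped
        let first_part := PySem.List.slice content_lower none (some 1000)
        pvLoopA error_patterns first_part

-- ===== PORT B =====
def pvAnywhere : List String := ["error:", "exception:"]
def pvNear : List String :=
  ["traceback", "failed to", "unable to convert", "conversion failed", "error processing"]

-- Source B's 'for i in range(len(text)) …' scan; 'text.startswith(p, i)' is p.toList.isPrefixOf on the current suffix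
def pvScanB (i : Nat) (s : List Char) : Bool :=
  match s with
  | [] => true
  | _ :: rest =>
    if pvAnywhere.any (fun p => p.toList.isPrefixOf s) then false
    else if decide (i < 100) && pvNear.any (fun p => p.toList.isPrefixOf s) then false
    else pvScanB (i + 1) rest

def is_content_valid_alt (content : Option String) : Bool :=
  match content with
  | none => false
  | some c =>
    if c.toList = [] then false
    else
      let stripped := PySem.Chars.strip c.toList
      if stripped.length < 50 then false
      else
        let text := PySem.List.slice (PySem.Chars.lower stripped) none (some 1000)
        pvScanB 0 text

-- ===== PRECONDITION & SPEC =====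
def Spec_is_content_valid (content : Option String) (out : Bool) : Prop := out = is_content_valid_alt content
instance (content : Option String) (out : Bool) : Decidable (Spec_is_content_valid content out) := by unfold Spec_is_content_valid; infer_instance

-- ===== CLAIM (what is proved, stated in full; the proofs are below) =====
def Claim_equal_is_content_valid : Prop := ∀ (content : Option String), Dom_is_content_valid content → Spec_is_content_valid content (is_content_valid content)

-- ===== LEMMAS AND PROOFS =====

-- s.find(sub) is ≥ 0 exactly when 'sub in s'
theorem pv_find_nonneg_iff (fp p : List Char) :
    (0 ≤ PySem.Chars.find fp p) ↔ PySem.Chars.isIn p fp = true := by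
  rw [PySem.Chars.isIn_iff_infix]; exact PySem.Chars.find_nonneg_iff fp p

-- B's '0 <= find(p) < 100' test characterised by occurrences
theorem pv_range_iff (fp p : List Char) :
    (0 ≤ PySem.Chars.find fp p ∧ PySem.Chars.find fp p < 100)
      ↔ ∃ j, j < 100 ∧ p <+: fp.drop j := by
  constructor
  · rintro ⟨h0, h100⟩
    have hs := PySem.Chars.find_spec (s := fp) (sub := p) h0
    exact ⟨(PySem.Chars.find fp p).toNat, by omega, hs.1⟩
  · rintro ⟨j, hj, hpre⟩
    have hin : PySem.Chars.isIn p fp = true :=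
      (PySem.Chars.exists_prefix_drop_iff_isIn p fp).1 ⟨j, hpre⟩
    have h0 : 0 ≤ PySem.Chars.find fp p := (pv_find_nonneg_iff fp p).2 hin
    have hs := PySem.Chars.find_spec (s := fp) (sub := p) h0
    refine ⟨h0, ?_⟩
    by_contra h
    exact hs.2 j (by omega) hpre

theorem pv_isIn_false_iff (fp p : List Char) :
    PySem.Chars.isIn p fp = false ↔ ∀ j, ¬ p <+: fp.drop j := by
  constructor
  · intro h j hpre
    have := (PySem.Chars.exists_prefix_drop_iff_isIn p fp).1 ⟨j, hpre⟩
    simp [h] at this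
  · intro h
    by_contra hne
    have : PySem.Chars.isIn p fp = true := by
      cases hx : PySem.Chars.isIn p fp <;> simp_all
    obtain ⟨j, hj⟩ := (PySem.Chars.exists_prefix_drop_iff_isIn p fp).2 this
    exact h j hj

-- characterisation of B's scan loop
theorem pvScanB_iff (s : List Char) (i : Nat) :
    pvScanB i s = true ↔
      ((∀ j, ¬ pvAnywhere.any (fun p => p.toList.isPrefixOf (s.drop j)) = true) ∧
       (∀ j, i + j < 100 → ¬ pvNear.any (fun p => p.toList.isPrefixOf (s.drop j)) = true)) := by
  induction s generalizing i with
  | nil =>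
    simp only [pvScanB, List.drop_nil]
    constructor
    · intro _
      exact ⟨fun j => by decide, fun j _ => by decide⟩
    · intro _; trivial
  | cons c rest ih =>
    by_cases hA : pvAnywhere.any (fun p => p.toList.isPrefixOf (c :: rest)) = true
    · simp only [pvScanB, hA, if_true]
      constructor
      · intro h; exact absurd h (by simp)
      · rintro ⟨h1, _⟩
        exact absurd hA (by simpa using h1 0)
    · by_cases hN : (decide (i < 100) && pvNear.any (fun p => p.toList.isPrefixOf (c :: rest))) = true
      · simp only [pvScanB, hA, hN, Bool.false_eq_true, if_false, if_true]
        rw [Bool.and_eq_true, decide_eq_true_eq] at hN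
        constructor
        · intro h; exact absurd h (by simp)
        · rintro ⟨_, h2⟩
          have := h2 0 (by omega)
          simp only [List.drop_zero] at this
          exact (this hN.2).elim
      · simp only [pvScanB, hA, hN, Bool.false_eq_true, if_false]
        rw [ih (i + 1)]
        constructor
        · rintro ⟨h1, h2⟩
          refine ⟨?_, ?_⟩
          · intro j
            cases j with
            | zero => simpa using hA
            | succ k => simpa using h1 k
          · intro j hj
            cases j with
            | zero =>
              intro hc
              simp only [List.drop_zero] at hc
              apply hN
              rw [Bool.and_eq_true, decide_eq_true_eq]
              exact ⟨by omega, hc⟩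
            | succ k =>
              have := h2 k (by omega)
              simpa using this
        · rintro ⟨h1, h2⟩
          refine ⟨?_, ?_⟩
          · intro j; simpa using h1 (j + 1)
          · intro j hj
            have := h2 (j + 1) (by omega)
            simpa using this

theorem pv_if_false (p : Prop) [Decidable p] (b : Bool) :
    (if p then false else b) = (!decide p && b) := by
  by_cases h : p <;> simp [h]

set_option maxHeartbeats 1000000 in
-- A's loop over the concrete pattern list equals the two-group form
theorem pvLoopA_eq (fp : List Char) :
    pvLoopA ["traceback", "exception:", "error:", "failed to",
      "unable to convert", "conversion failed", "error processing"] fp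
    = (if pvAnywhere.any (fun p => PySem.Chars.isIn p.toList fp) then false
       else !(pvNear.any (fun p =>
           decide (0 ≤ PySem.Chars.find fp p.toList ∧ PySem.Chars.find fp p.toList < 100)))) := by
  have hsplit : ∀ p : List Char,
      decide (0 ≤ PySem.Chars.find fp p ∧ PySem.Chars.find fp p < 100)
        = (PySem.Chars.isIn p fp && decide (PySem.Chars.find fp p < 100)) := by
    intro p
    by_cases h : PySem.Chars.isIn p fp = true
    · simp [h, (pv_find_nonneg_iff fp p).2 h]
    · have : ¬ (0 ≤ PySem.Chars.find fp p) := fun hc => h ((pv_find_nonneg_iff fp p).1 hc)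
      simp [h, this]
  simp only [pvLoopA, pvAnywhere, pvNear, List.any_cons, List.any_nil,
    hsplit, String.reduceBEq, Bool.or_false, Bool.or_self, if_true, Bool.false_or]
  simp only [pv_if_false, Bool.decide_eq_true]
  generalize PySem.Chars.isIn "traceback".toList fp = a1
  generalize PySem.Chars.isIn "exception:".toList fp = a2
  generalize PySem.Chars.isIn "error:".toList fp = a3
  generalize PySem.Chars.isIn "failed to".toList fp = a4
  generalize PySem.Chars.isIn "unable to convert".toList fp = a5
  generalize PySem.Chars.isIn "conversion failed".toList fp = a6
  generalize PySem.Chars.isIn "error processing".toList fp = a7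
  generalize decide (PySem.Chars.find fp "traceback".toList < 100) = d1
  generalize decide (PySem.Chars.find fp "failed to".toList < 100) = d4
  generalize decide (PySem.Chars.find fp "unable to convert".toList < 100) = d5
  generalize decide (PySem.Chars.find fp "conversion failed".toList < 100) = d6
  generalize decide (PySem.Chars.find fp "error processing".toList < 100) = d7
  revert a1 a2 a3 a4 a5 a6 a7 d1 d4 d5 d6 d7
  decide

-- the two loops agree on every text
theorem pv_loops_eq (fp : List Char) :
    pvLoopA ["traceback", "exception:", "error:", "failed to",
      "unable to convert", "conversion failed", "error processing"] fp = pvScanB 0 fp := by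
  rw [pvLoopA_eq]
  rw [Bool.eq_iff_iff]
  rw [pvScanB_iff]
  constructor
  · intro h
    by_cases hA : pvAnywhere.any (fun p => PySem.Chars.isIn p.toList fp) = true
    · simp [hA] at h
    · simp only [hA, Bool.false_eq_true, if_false] at h ⊢
      have hA' : ∀ p ∈ pvAnywhere, PySem.Chars.isIn p.toList fp = false := by
        intro p hp
        cases hx : PySem.Chars.isIn p.toList fp
        · rfl
        · exact absurd (List.any_eq_true.mpr ⟨p, hp, hx⟩) hA
      have hN' : ∀ p ∈ pvNear,
          ¬ (0 ≤ PySem.Chars.find fp p.toList ∧ PySem.Chars.find fp p.toList < 100) := by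
        intro p hp hc
        have h' := h
        simp only [Bool.not_eq_true', List.any_eq_false, decide_eq_true_eq, not_and, not_lt] at h'
        exact absurd (h' p hp hc.1) (by omega)
      refine ⟨?_, ?_⟩
      · intro j hany
        obtain ⟨p, hp, hpre⟩ := List.any_eq_true.mp hany
        exact absurd hpre (by
          have := (pv_isIn_false_iff fp p.toList).1 (hA' p hp) j
          simpa using this)
      · intro j hj hany
        obtain ⟨p, hp, hpre⟩ := List.any_eq_true.mp hany
        exact hN' p hp ((pv_range_iff fp p.toList).2
          ⟨j, by omega, by simpa using hpre⟩)
  · rintro ⟨h1, h2⟩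
    have hA : (pvAnywhere.any fun p => PySem.Chars.isIn p.toList fp) = false := by
      rw [List.any_eq_false]
      intro p hp
      simp only [Bool.not_eq_true]
      rw [pv_isIn_false_iff]
      intro j hpre
      exact h1 j (List.any_eq_true.mpr ⟨p, hp, by simpa using hpre⟩)
    simp only [hA, Bool.false_eq_true, if_false]
    simp only [Bool.not_eq_true', List.any_eq_false, decide_eq_true_eq, not_and, not_lt]
    intro x hx h0
    by_contra hlt
    obtain ⟨j, hj, hpre⟩ := (pv_range_iff fp x.toList).1 ⟨h0, by omega⟩
    exact absurd (List.any_eq_true.mpr ⟨x, hx, by simpa using hpre⟩) (h2 j (by omega))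

-- ===== VERDICT (by name: the statement is the Claim_ definition above) =====
theorem is_content_valid_spec : Claim_equal_is_content_valid := by
  intro content _
  unfold Spec_is_content_valid is_content_valid is_content_valid_alt
  match content with
  | none => rfl
  | some c =>
    by_cases h0 : c.toList = []
    · simp [h0]
    · simp only [h0, if_false]
      by_cases h1 : (PySem.Chars.strip c.toList).length < 50
      · simp [h1]
      · simp only [h1, if_false]
        exact pv_loops_eq _
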